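-- pv_equiv track=rewrite | github.com/CentreForDigitalHumanities/I-analyzer | backend/corpora/peaceportal/peaceportal.py | clean_newline_characters
-- ===== SOURCE A (Python) =====
-- def clean_newline_characters(text):
--     '''
--     Remove all spaces surrounding newlines in `text`.
--     Also removes multiple newline characters in a row.
--     '''
--     if not text:
--         return
--     parts = text.split('\n')
--     cleaned = []
--     for part in parts:
--         if not '\n' in part:
--             stripped = part.strip()
--             if stripped:
--                 cleaned.append(part.strip())
--     return '\n'.join(cleaned)
-- ===== SOURCE B (Python) =====
-- def clean_newline_characters(text):
--     '''
--     Remove all spaces surrounding newlines in `text`.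
--     Also removes multiple newline characters in a row.
--     '''
--     if not text:
--         return
--     WS = ' \t\r\x0b\x0c'
--     res = []      # output characters
--     buf = []      # pending whitespace inside the current line
--     in_line = False  # current line has already produced a character
--     for ch in text:
--         if ch == '\n':
--             buf = []
--             in_line = False
--         elif ch in WS:
--             if in_line:
--                 buf.append(ch)
--         else:
--             if in_line:
--                 res.extend(buf)
--                 buf = []
--             else:
--                 if res:
--                     res.append('\n')
--                 in_line = True
--             res.append(ch)
--     return ''.join(res)
-- ===== Notes on version B (the rewrite author's own statement) =====
-- stated objective: alternative
-- what changed: Replaces A's split-on-newline / per-part strip / drop-empties / rejoin pipeline with a single character-level state-machine pass that buffers pending in-line whitespace and emits separators lazily.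
import Mathlib
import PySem

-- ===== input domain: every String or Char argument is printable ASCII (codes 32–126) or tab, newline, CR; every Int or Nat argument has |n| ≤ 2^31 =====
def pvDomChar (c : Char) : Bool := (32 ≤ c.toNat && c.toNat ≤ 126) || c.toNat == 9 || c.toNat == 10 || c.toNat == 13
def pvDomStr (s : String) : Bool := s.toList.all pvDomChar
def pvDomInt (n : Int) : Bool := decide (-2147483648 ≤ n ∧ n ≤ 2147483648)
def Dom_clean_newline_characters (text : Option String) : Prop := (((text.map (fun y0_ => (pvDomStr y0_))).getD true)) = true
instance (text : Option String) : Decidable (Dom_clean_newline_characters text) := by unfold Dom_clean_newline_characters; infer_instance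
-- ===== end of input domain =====

-- B replaces A's split/strip/filter/join pipeline by a single character-level state-machine pass (alternative decomposition, same cost).

-- ===== PORT A =====
def clean_newline_characters (text : Option String) : Option String :=
  match text with
  | none => none
  | some s =>
    if s.toList = [] then none            -- `if not text: return`
    else
      let parts : List String := (PySem.Str.split? s "\n").getD []
      let cleaned : List String := parts.foldl (fun acc part =>
        if !(PySem.Str.isIn "\n" part) then
          if (PySem.Str.strip part).toList ≠ [] then acc ++ [PySem.Str.strip part] else acc
        else acc) []
      some (PySem.Str.join "\n" cleaned)

-- ===== PORT B =====
-- `ch in ' \t\r\x0b\x0c'` (the ASCII whitespace characters other than '\n'), as code-point tests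
def pvWsB (c : Char) : Bool :=
  c.toNat == 32 || c.toNat == 9 || c.toNat == 13 || c.toNat == 11 || c.toNat == 12

-- one step of B's loop; state = (res, buf, in_line)
def pvStep (st : List Char × List Char × Bool) (c : Char) : List Char × List Char × Bool :=
  if c = '\n' then (st.1, [], false)
  else if pvWsB c then (st.1, if st.2.2 then st.2.1 ++ [c] else st.2.1, st.2.2)
  else if st.2.2 then (st.1 ++ st.2.1 ++ [c], [], true)
  else ((if st.1 = [] then st.1 ++ [c] else st.1 ++ '\n' :: [c]), [], true)

def clean_newline_characters_alt (text : Option String) : Option String :=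
  match text with
  | none => none
  | some s =>
    if s.toList = [] then none            -- `if not text: return`
    else some (String.ofList (s.toList.foldl pvStep ([], [], false)).1)

-- ===== PRECONDITION & SPEC =====
def Spec_clean_newline_characters (text : Option String) (out : Option String) : Prop := out = clean_newline_characters_alt text
instance (text : Option String) (out : Option String) : Decidable (Spec_clean_newline_characters text out) := by unfold Spec_clean_newline_characters; infer_instance

-- ===== CLAIM (what is proved, stated in full; the proofs are below) =====
def Claim_equal_clean_newline_characters : Prop := ∀ (text : Option String), Dom_clean_newline_characters text → Spec_clean_newline_characters text (clean_newline_characters text)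

-- ===== LEMMAS AND PROOFS =====

-- trailing-whitespace strip / trailing-whitespace run, w.r.t. B's whitespace test
def pvRstrip (l : List Char) : List Char := (l.reverse.dropWhile pvWsB).reverse
def pvTrail (l : List Char) : List Char := (l.reverse.takeWhile pvWsB).reverse

-- the value A's pipeline contributes for one newline-free part, folded over parts
def pvEmit (res p : List Char) : List Char :=
  if PySem.Chars.strip p = [] then res
  else if res = [] then PySem.Chars.strip p
  else res ++ '\n' :: PySem.Chars.strip p

def pvF (parts : List (List Char)) : List (List Char) :=
  (parts.map PySem.Chars.strip).filter (fun l => decide (l ≠ []))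

lemma pvWs_ne_nl {c : Char} (h : pvWsB c = true) : ¬ c = '\n' := by
  intro hc; subst hc; simp [pvWsB] at h

lemma pvWs_isspace {c : Char} (h : pvDomChar c = true) (h2 : ¬ c = '\n') :
    pvWsB c = PySem.Chars.isspace c := by
  have h10 : c.toNat ≠ 10 := by
    intro hn
    apply h2
    have hc : Char.ofNat c.toNat = c := Char.ofNat_toNat c
    rw [hn] at hc
    exact hc.symm
  simp only [pvDomChar, Bool.or_eq_true, Bool.and_eq_true, decide_eq_true_eq, beq_iff_eq] at h
  have : (pvWsB c = true) ↔ (PySem.Chars.isspace c = true) := by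
    simp only [pvWsB, PySem.Chars.isspace, Bool.or_eq_true, Bool.and_eq_true,
      decide_eq_true_eq, beq_iff_eq]
    omega
  exact Bool.coe_iff_coe.mp this

-- ---- List.splitOn on a single character, structural equations ----

lemma pvSplitOn_cons (d c : Char) (cs : List Char) :
    (c :: cs).splitOn d
      = if c == d then [] :: cs.splitOn d
        else (cs.splitOn d).modifyHead (fun t => c :: t) := by
  simp only [List.splitOn, List.splitOnP_cons]

-- ---- characterisation of PySem.Chars.splitOn on a single-character separator ----

lemma pvGo_eq (d : Char) :
    ∀ (n : Nat) (l cur : List Char) (acc : List (List Char)), l.length < n →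
    PySem.Chars.splitOn.go [d] n l cur acc
      = acc.reverse ++ (l.splitOn d).modifyHead (fun t => cur.reverse ++ t) := by
  intro n
  induction n with
  | zero => intro l cur acc h; exact absurd h (Nat.not_lt_zero _)
  | succ n ih =>
    intro l cur acc h
    cases l with
    | nil =>
      simp [PySem.Chars.splitOn.go]
    | cons c rest =>
      have hlen : rest.length < n := by simpa using h
      rw [PySem.Chars.splitOn.go]
      by_cases hdc : d = c
      · subst hdc
        have hpre : ([d].isPrefixOf (d :: rest)) = true := by simp [List.isPrefixOf]
        simp only [hpre, if_true, List.length_cons, List.length_nil]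
        rw [show List.drop 1 (d :: rest) = rest from rfl]
        rw [ih rest [] (cur.reverse :: acc) hlen]
        rw [pvSplitOn_cons]
        simp only [beq_self_eq_true, if_true, List.modifyHead_cons]
        cases hsp : rest.splitOn d with
        | nil => simp
        | cons h0 t => simp
      · have hpre : ([d].isPrefixOf (c :: rest)) = false := by
          simp [List.isPrefixOf]
          intro hh; exact absurd hh (fun e => hdc e)
        simp only [hpre, Bool.false_eq_true, if_false]
        rw [ih rest (c :: cur) acc hlen]
        rw [pvSplitOn_cons]
        have : (c == d) = false := by simp; intro e; exact hdc e.symm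
        simp only [this, Bool.false_eq_true, if_false]
        cases hsp : rest.splitOn d with
        | nil => simp
        | cons h0 t => simp

lemma pvSplitOn_single (cs : List Char) (d : Char) :
    PySem.Chars.splitOn cs [d] = cs.splitOn d := by
  unfold PySem.Chars.splitOn
  rw [pvGo_eq d (cs.length + 1) cs [] [] (by omega)]
  cases hsp : cs.splitOn d with
  | nil => simp
  | cons h0 t => simp

lemma pvSplitOn_not_mem (d : Char) : ∀ (cs : List Char), ∀ p ∈ cs.splitOn d, d ∉ p := by
  intro cs
  induction cs with
  | nil => simp
  | cons c cs ih =>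
    intro p hp
    rw [pvSplitOn_cons] at hp
    by_cases hcd : c = d
    · simp only [hcd, beq_self_eq_true, if_true] at hp
      rcases List.mem_cons.mp hp with rfl | hp'
      · simp
      · exact ih p hp'
    · have : (c == d) = false := by simp [hcd]
      simp only [this, Bool.false_eq_true, if_false] at hp
      cases hsp : cs.splitOn d with
      | nil => rw [hsp] at hp; simp at hp
      | cons h0 t =>
        rw [hsp, List.modifyHead_cons] at hp
        rcases List.mem_cons.mp hp with rfl | hp'
        · intro hmem
          rcases List.mem_cons.mp hmem with rfl | hmem'
          · exact hcd rfl
          · exact ih h0 (by rw [hsp]; exact List.mem_cons_self) hmem'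
        · exact ih p (by rw [hsp]; exact List.mem_cons_of_mem _ hp')

lemma pvMem_join {d : Char} : ∀ (parts : List (List Char)) (p : List Char), p ∈ parts →
    ∀ c ∈ p, c ∈ PySem.Chars.join [d] parts := by
  intro parts
  induction parts with
  | nil => intro p hp; simp at hp
  | cons a t ih =>
    intro p hp c hc
    cases t with
    | nil =>
      rcases List.mem_cons.mp hp with rfl | hp'
      · simpa [PySem.Chars.join_singleton] using hc
      · simp at hp'
    | cons b t' =>
      rw [PySem.Chars.join_cons_cons]
      rcases List.mem_cons.mp hp with rfl | hp'
      · exact List.mem_append.mpr (Or.inl (List.mem_append.mpr (Or.inl hc)))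
      · simp only [List.mem_append]
        right
        simpa using ih p hp' c hc

-- ---- A's fold = filtered map ----

lemma pvFoldA : ∀ (ps : List String), (∀ p ∈ ps, PySem.Str.isIn "\n" p = false) →
    ∀ acc : List String,
    ps.foldl (fun acc part =>
        if !(PySem.Str.isIn "\n" part) then
          if (PySem.Str.strip part).toList ≠ [] then acc ++ [PySem.Str.strip part] else acc
        else acc) acc
      = acc ++ (ps.map PySem.Str.strip).filter (fun t => decide (t.toList ≠ [])) := by
  intro ps
  induction ps with
  | nil => intro _ acc; simp
  | cons p ps ih =>
    intro h acc
    have hp := h p List.mem_cons_self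
    simp only [List.foldl_cons, List.map_cons, List.filter_cons, hp, Bool.not_false, if_true]
    by_cases hs : (PySem.Str.strip p).toList ≠ []
    · rw [if_pos hs, ih (fun q hq => h q (List.mem_cons_of_mem _ hq))]
      simp only [List.append_assoc]
      simp
      simpa using hs
    · rw [if_neg hs, ih (fun q hq => h q (List.mem_cons_of_mem _ hq))]
      have hs2 : (PySem.Str.strip p).toList = [] := not_ne_iff.mp hs
      simp [hs2]

-- ---- join over a singleton separator, as a flatMap ----

lemma pvJoinFlat (d : Char) : ∀ (t : List (List Char)) (a : List Char),
    PySem.Chars.join [d] (a :: t) = a ++ t.flatMap (fun p => d :: p) := by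
  intro t
  induction t with
  | nil => intro a; simp [PySem.Chars.join_singleton]
  | cons b t' ih =>
    intro a
    rw [PySem.Chars.join_cons_cons, ih b]
    simp

lemma pvEmitJoin : ∀ (parts : List (List Char)) (res : List Char),
    parts.foldl pvEmit res
      = if res = [] then PySem.Chars.join ['\n'] (pvF parts)
        else res ++ (pvF parts).flatMap (fun p => '\n' :: p) := by
  intro parts
  induction parts with
  | nil =>
    intro res
    by_cases h : res = [] <;> simp [h, pvF, PySem.Chars.join_nil]
  | cons p ps ih =>
    intro res
    rw [List.foldl_cons, ih (pvEmit res p)]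
    by_cases h1 : PySem.Chars.strip p = []
    · have hF : pvF (p :: ps) = pvF ps := by simp [pvF, h1]
      rw [hF]
      simp [pvEmit, h1]
    · have hF : pvF (p :: ps) = PySem.Chars.strip p :: pvF ps := by
        simp [pvF, h1]
      rw [hF]
      by_cases h2 : res = []
      · have he : pvEmit res p = PySem.Chars.strip p := by simp [pvEmit, h1, h2]
        rw [he]
        simp only [h1, if_false, h2, if_true]
        rw [pvJoinFlat]
      · have he : pvEmit res p = res ++ '\n' :: PySem.Chars.strip p := by
          simp [pvEmit, h1, h2]
        rw [he]
        have hne : res ++ '\n' :: PySem.Chars.strip p ≠ [] := by simp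
        simp only [hne, if_false, h2, if_false]
        simp

-- ---- B's machine, line by line ----

lemma pvWsRun : ∀ (lp : List Char) (res : List Char), (∀ c ∈ lp, pvWsB c = true) →
    lp.foldl pvStep (res, [], false) = (res, [], false) := by
  intro lp
  induction lp with
  | nil => intro res _; rfl
  | cons c lp ih =>
    intro res h
    have hc := h c List.mem_cons_self
    have hnl := pvWs_ne_nl hc
    rw [List.foldl_cons]
    rw [show pvStep (res, [], false) c = (res, [], false) from by
      simp [pvStep, hnl, hc]]
    exact ih res (fun x hx => h x (List.mem_cons_of_mem _ hx))

lemma pvDropWhile_head (p : Char → Bool) :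
    ∀ (l : List Char) (c : Char) (m : List Char), l.dropWhile p = c :: m → p c = false := by
  intro l
  induction l with
  | nil => intro c m h; simp [List.dropWhile] at h
  | cons a l ih =>
    intro c m h
    rw [List.dropWhile_cons] at h
    by_cases hpa : p a = true
    · simp only [hpa, if_true] at h
      exact ih c m h
    · simp only [hpa] at h
      cases h
      simpa using hpa

lemma pvRstrip_append {c : Char} (hc : pvWsB c = false) (xs ys : List Char) :
    pvRstrip (xs ++ c :: ys) = xs ++ c :: pvRstrip ys := by
  unfold pvRstrip
  rw [List.reverse_append, List.reverse_cons]
  rw [show ys.reverse ++ [c] ++ xs.reverse = ys.reverse ++ ([c] ++ xs.reverse) from by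
    simp [List.append_assoc]]
  rw [List.dropWhile_append]
  by_cases h : (ys.reverse.dropWhile pvWsB).isEmpty = true
  · rw [if_pos h]
    have hnil : ys.reverse.dropWhile pvWsB = [] := List.isEmpty_iff.mp h
    rw [show ([c] ++ xs.reverse) = c :: xs.reverse from rfl, List.dropWhile_cons]
    simp [hc, hnil]
  · rw [if_neg h]
    simp

lemma pvTrail_append {c : Char} (hc : pvWsB c = false) (xs ys : List Char) :
    pvTrail (xs ++ c :: ys) = pvTrail ys := by
  unfold pvTrail
  rw [List.reverse_append, List.reverse_cons]
  rw [show ys.reverse ++ [c] ++ xs.reverse = ys.reverse ++ ([c] ++ xs.reverse) from by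
    simp [List.append_assoc]]
  rw [List.takeWhile_append]
  by_cases h : (ys.reverse.takeWhile pvWsB).length = ys.reverse.length
  · rw [if_pos h]
    have heq : ys.reverse.takeWhile pvWsB = ys.reverse :=
      (List.takeWhile_prefix pvWsB).eq_of_length h
    rw [show ([c] ++ xs.reverse) = c :: xs.reverse from rfl, List.takeWhile_cons]
    simp [hc, heq]
  · rw [if_neg h]

lemma pvInlineRun : ∀ (m : List Char) (res b0 : List Char),
    (∀ c ∈ m, ¬ c = '\n') → (∀ c ∈ b0, pvWsB c = true) →
    m.foldl pvStep (res, b0, true) = (res ++ pvRstrip (b0 ++ m), pvTrail (b0 ++ m), true) := by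
  intro m
  induction m with
  | nil =>
    intro res b0 _ hb
    have hdrop : b0.reverse.dropWhile pvWsB = [] := by
      rw [List.dropWhile_eq_nil_iff]
      intro x hx; exact hb x (List.mem_reverse.mp hx)
    have htake : b0.reverse.takeWhile pvWsB = b0.reverse := by
      have h2 := List.takeWhile_append_dropWhile (p := pvWsB) (l := b0.reverse)
      rw [hdrop, List.append_nil] at h2
      exact h2
    simp [pvRstrip, pvTrail, hdrop, htake]
  | cons c m ih =>
    intro res b0 hm hb
    have hnl : ¬ c = '\n' := hm c List.mem_cons_self
    rw [List.foldl_cons]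
    by_cases hws : pvWsB c = true
    · rw [show pvStep (res, b0, true) c = (res, b0 ++ [c], true) from by
        simp [pvStep, hnl, hws]]
      rw [ih res (b0 ++ [c]) (fun x hx => hm x (List.mem_cons_of_mem _ hx))
        (by intro x hx
            rcases List.mem_append.mp hx with h1 | h1
            · exact hb x h1
            · rcases List.mem_singleton.mp h1 with rfl; exact hws)]
      simp [List.append_assoc]
    · have hws' : pvWsB c = false := by simpa using hws
      rw [show pvStep (res, b0, true) c = (res ++ b0 ++ [c], [], true) from by
        simp [pvStep, hnl, hws']]
      rw [ih (res ++ b0 ++ [c]) [] (fun x hx => hm x (List.mem_cons_of_mem _ hx))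
        (by intro x hx; simp at hx)]
      rw [List.nil_append, pvRstrip_append hws' b0 m, pvTrail_append hws' b0 m]
      simp [List.append_assoc]

lemma pvDropWhile_congr (p q : Char → Bool) :
    ∀ (l : List Char), (∀ x ∈ l, p x = q x) → l.dropWhile p = l.dropWhile q := by
  intro l
  induction l with
  | nil => intro _; rfl
  | cons a l ih =>
    intro h
    have ha := h a List.mem_cons_self
    rw [List.dropWhile_cons, List.dropWhile_cons, ha]
    by_cases hq : q a = true
    · rw [if_pos hq, if_pos hq]
      exact ih (fun x hx => h x (List.mem_cons_of_mem _ hx))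
    · rw [if_neg hq, if_neg hq]

lemma pvStrip_eq (p : List Char) (hp : ∀ c ∈ p, pvDomChar c = true ∧ ¬ c = '\n') :
    PySem.Chars.strip p = pvRstrip (p.dropWhile pvWsB) := by
  have hl : PySem.Chars.lstrip p = p.dropWhile pvWsB := by
    unfold PySem.Chars.lstrip
    exact (pvDropWhile_congr pvWsB PySem.Chars.isspace p
      (fun x hx => pvWs_isspace (hp x hx).1 (hp x hx).2)).symm
  unfold PySem.Chars.strip PySem.Chars.rstrip
  rw [hl]
  unfold pvRstrip
  congr 1
  apply (pvDropWhile_congr pvWsB PySem.Chars.isspace _ _).symm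
  intro x hx
  have hxp : x ∈ p := (List.dropWhile_sublist pvWsB).subset (List.mem_reverse.mp hx)
  exact pvWs_isspace (hp x hxp).1 (hp x hxp).2

lemma pvLineNil (p : List Char) (res : List Char)
    (hp : ∀ c ∈ p, pvDomChar c = true ∧ ¬ c = '\n')
    (hs : PySem.Chars.strip p = []) :
    p.foldl pvStep (res, [], false) = (res, [], false) := by
  rw [pvStrip_eq p hp] at hs
  cases hq : p.dropWhile pvWsB with
  | cons c m =>
    have hc := pvDropWhile_head pvWsB p c m hq
    rw [hq] at hs
    rw [show (c :: m) = [] ++ c :: m from rfl, pvRstrip_append hc [] m] at hs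
    simp at hs
  | nil =>
    have hall : ∀ c ∈ p, pvWsB c = true := by
      rw [← List.dropWhile_eq_nil_iff (p := pvWsB)]
      exact hq
    exact pvWsRun p res hall

lemma pvLineCons (p : List Char) (res : List Char)
    (hp : ∀ c ∈ p, pvDomChar c = true ∧ ¬ c = '\n')
    (hs : PySem.Chars.strip p ≠ []) :
    ∃ b, p.foldl pvStep (res, [], false)
      = ((if res = [] then [] else res ++ ['\n']) ++ PySem.Chars.strip p, b, true) := by
  rw [pvStrip_eq p hp] at hs ⊢
  cases hq : p.dropWhile pvWsB with
  | nil => rw [hq] at hs; simp [pvRstrip] at hs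
  | cons c m =>
    have hc : pvWsB c = false := pvDropWhile_head pvWsB p c m hq
    have hdecomp : p = p.takeWhile pvWsB ++ c :: m := by
      rw [← hq]; exact (List.takeWhile_append_dropWhile).symm
    have hsubm : ∀ x ∈ c :: m, x ∈ p := by
      intro x hx; rw [← hq] at hx; exact (List.dropWhile_sublist pvWsB).subset hx
    refine ⟨pvTrail m, ?_⟩
    conv_lhs => rw [hdecomp]
    rw [List.foldl_append]
    rw [pvWsRun (p.takeWhile pvWsB) res
      (fun x hx => by
        have := List.mem_takeWhile_imp hx
        exact this)]
    rw [List.foldl_cons]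
    have hnlc : ¬ c = '\n' := (hp c (hsubm c List.mem_cons_self)).2
    rw [show pvStep (res, [], false) c
        = ((if res = [] then [] else res ++ ['\n']) ++ [c], [], true) from by
      by_cases hr : res = [] <;> simp [pvStep, hnlc, hc, hr]]
    rw [pvInlineRun m _ []
      (fun x hx => (hp x (hsubm x (List.mem_cons_of_mem _ hx))).2)
      (by intro x hx; simp at hx)]
    rw [List.nil_append]
    have hcm : pvRstrip (c :: m) = c :: pvRstrip m := by
      simpa using pvRstrip_append hc [] m
    rw [hcm]
    simp [List.append_assoc]

lemma pvMachineJoin : ∀ (parts : List (List Char)) (res : List Char),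
    (∀ p ∈ parts, ∀ c ∈ p, pvDomChar c = true ∧ ¬ c = '\n') →
    ((PySem.Chars.join ['\n'] parts).foldl pvStep (res, [], false)).1
      = parts.foldl pvEmit res := by
  intro parts
  induction parts with
  | nil => intro res _; simp [PySem.Chars.join_nil]
  | cons p t ih =>
    intro res h
    have hp := h p List.mem_cons_self
    cases t with
    | nil =>
      rw [PySem.Chars.join_singleton]
      by_cases hs : PySem.Chars.strip p = []
      · rw [pvLineNil p res hp hs]
        simp [pvEmit, hs]
      · obtain ⟨b, hb⟩ := pvLineCons p res hp hs
        rw [hb]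
        by_cases hr : res = [] <;> simp [pvEmit, hs, hr]
    | cons q t' =>
      rw [PySem.Chars.join_cons_cons]
      rw [show p ++ ['\n'] ++ PySem.Chars.join ['\n'] (q :: t')
          = p ++ '\n' :: PySem.Chars.join ['\n'] (q :: t') from by simp]
      rw [List.foldl_append]
      have hstep : ∀ st : List Char × List Char × Bool,
          pvStep st '\n' = (st.1, [], false) := by
        intro st; simp [pvStep]
      by_cases hs : PySem.Chars.strip p = []
      · rw [pvLineNil p res hp hs]
        rw [List.foldl_cons, hstep]
        rw [ih res (fun r hr => h r (List.mem_cons_of_mem _ hr))]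
        simp only [List.foldl_cons]
        rw [show pvEmit res p = res from by simp [pvEmit, hs]]
      · obtain ⟨b, hb⟩ := pvLineCons p res hp hs
        rw [hb, List.foldl_cons, hstep]
        have he : (if res = [] then [] else res ++ ['\n']) ++ PySem.Chars.strip p
            = pvEmit res p := by
          by_cases hr : res = [] <;> simp [pvEmit, hs, hr]
        rw [he]
        rw [ih (pvEmit res p) (fun r hr => h r (List.mem_cons_of_mem _ hr))]
        simp only [List.foldl_cons]

-- ===== VERDICT (by name: the statement is the Claim_ definition above) =====
theorem clean_newline_characters_spec : Claim_equal_clean_newline_characters := by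
  unfold Claim_equal_clean_newline_characters
  intro text dom
  unfold Spec_clean_newline_characters
  cases text with
  | none => rfl
  | some s =>
    by_cases hnil : s.toList = []
    · simp [clean_newline_characters, clean_newline_characters_alt, hnil]
    · have hall : ∀ c ∈ s.toList, pvDomChar c = true := by
        have : pvDomStr s = true := by
          simpa [Dom_clean_newline_characters] using dom
        simpa [pvDomStr, List.all_eq_true] using this
      set cs := s.toList with hcs
      have hjoin : PySem.Chars.join ['\n'] (cs.splitOn '\n') = cs := by
        simpa [PySem.Chars.join] using List.intercalate_splitOn cs '\n'
      have hnomem : ∀ p ∈ cs.splitOn '\n', '\n' ∉ p := pvSplitOn_not_mem '\n' cs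
      have hprops : ∀ p ∈ cs.splitOn '\n', ∀ c ∈ p, pvDomChar c = true ∧ ¬ c = '\n' := by
        intro p hpmem c hcmem
        constructor
        · apply hall
          rw [← hjoin]
          exact pvMem_join (cs.splitOn '\n') p hpmem c hcmem
        · intro hceq; subst hceq; exact hnomem p hpmem hcmem
      -- B's side
      have hB : clean_newline_characters_alt (some s)
          = some (String.ofList ((cs.splitOn '\n').foldl pvEmit [])) := by
        simp only [clean_newline_characters_alt, hnil, if_false, ← hcs]
        congr 2
        have h := pvMachineJoin (cs.splitOn '\n') [] hprops
        rw [hjoin] at h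
        exact h
      -- A's side
      have hparts : (PySem.Str.split? s "\n").getD []
          = (cs.splitOn '\n').map String.ofList := by
        have h1 : PySem.Chars.split? cs ['\n'] = some (cs.splitOn '\n') := by
          rw [show PySem.Chars.split? cs ['\n']
              = some (PySem.Chars.splitOn cs ['\n']) from by rfl]
          rw [pvSplitOn_single]
        simp [PySem.Str.split?, show ("\n" : String).toList = ['\n'] from rfl, ← hcs, h1]
      have hno : ∀ pstr ∈ (cs.splitOn '\n').map String.ofList,
          PySem.Str.isIn "\n" pstr = false := by
        intro pstr hmem
        rcases List.mem_map.mp hmem with ⟨p, hpmem, rfl⟩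
        have hnm : '\n' ∉ p := hnomem p hpmem
        have : ¬ (PySem.Chars.isIn ['\n'] p = true) := by
          rw [PySem.Chars.isIn_iff_infix]
          intro hinf
          exact hnm (hinf.subset (by simp))
        have h2 : PySem.Chars.isIn ['\n'] p = false := by simpa using this
        simp [PySem.Str.isIn, show ("\n" : String).toList = ['\n'] from rfl,
          String.toList_ofList, h2]
      have hA : clean_newline_characters (some s)
          = some (PySem.Str.join "\n" ((((cs.splitOn '\n').map String.ofList).map
              PySem.Str.strip).filter (fun t => decide (t.toList ≠ [])))) := by
        simp only [clean_newline_characters, hnil, if_false, ← hcs, hparts]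
        rw [pvFoldA _ hno []]
        simp
      rw [hA, hB]
      -- bridge the A-side string pipeline to the char level
      have hstripmap : ((cs.splitOn '\n').map String.ofList).map PySem.Str.strip
          = (cs.splitOn '\n').map (fun p => String.ofList (PySem.Chars.strip p)) := by
        rw [List.map_map]
        apply List.map_congr_left
        intro p _
        simp [PySem.Str.strip, String.toList_ofList]
      rw [hstripmap]
      have hfil : ((cs.splitOn '\n').map (fun p => String.ofList (PySem.Chars.strip p))).filter
            (fun t => decide (t.toList ≠ []))
          = (pvF (cs.splitOn '\n')).map String.ofList := by
        unfold pvF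
        rw [List.filter_map, List.filter_map, List.map_map]
        rw [show ((fun t : String => decide (t.toList ≠ [])) ∘
              fun p => String.ofList (PySem.Chars.strip p))
            = ((fun l : List Char => decide (l ≠ [])) ∘ PySem.Chars.strip) from by
          funext p; simp]
        rfl
      rw [hfil]
      rw [pvEmitJoin (cs.splitOn '\n') []]
      have hjoinStr : PySem.Str.join "\n" ((pvF (cs.splitOn '\n')).map String.ofList)
          = String.ofList (PySem.Chars.join ['\n'] (pvF (cs.splitOn '\n'))) := by
        simp only [PySem.Str.join, List.map_map]
        congr 1
        rw [show ("\n" : String).toList = ['\n'] from rfl]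
        congr 1
        rw [show (String.toList ∘ String.ofList) = (id : List Char → List Char) from by
          funext l; simp [String.toList_ofList]]
        exact List.map_id _
      rw [hjoinStr]
      simp
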